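-- pv_equiv track=rewrite | github.com/changez-zcz/LongAttn_lighting | src/DataProcess.py | sliding_window_sample
-- ===== SOURCE A (Python) =====
-- def sliding_window_sample(data, window_size):
--     """
--     Slice from both ends of the list towards the middle, cutting a window from the front and back each time, until the length of the middle segment falls within a specified range, and then process it as required.
--     :param data: Input data list
--     :param window_size: Size of the window
--     :return: List of sliced data segments
--     """
--     data_length = len(data)
--     segments = []
--
--
--     if data_length < window_size:
--         return segments
--
--     left = 0
--     right = data_length
--
--     while (right - left) > 3 * window_size:
--         # cutting a window from left
--         segments.append(data[left:left + window_size])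
--         left += window_size
--
--         # cutting a window from left
--         segments.append(data[right - window_size:right])
--         right -= window_size
--
--     remaining_length = right - left
--
--     if 1 * window_size < remaining_length <= 2 * window_size:
--         #if middle length is bettween window_size and 2 * window_size
--         segments.append(data[left:left + window_size])
--         segments.append(data[right - window_size:right])
--     elif 2 * window_size < remaining_length <= 3 * window_size:
--         # if middle length is bettween 2 * window_size and 3 * window_size
--         segments.append(data[left:left + window_size])
--         middle_start = left + (remaining_length - window_size) // 2
--         segments.append(data[middle_start:middle_start + window_size])
--         segments.append(data[right - window_size:right])
--
--     return segments
-- ===== SOURCE B (Python) =====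
-- def sliding_window_sample(data, window_size):
--     """Recursive decomposition: peel one window off each end of the current
--     segment and recurse on the shrinking middle sublist (no index pointers)."""
--     w = window_size
--
--     def go(seg):
--         m = len(seg)
--         if m > 3 * w:
--             return [seg[:w], seg[m - w:]] + go(seg[w:m - w])
--         if w < m <= 2 * w:
--             return [seg[:w], seg[m - w:]]
--         if 2 * w < m:
--             mid = (m - w) // 2
--             return [seg[:w], seg[mid:mid + w], seg[m - w:]]
--         return []
--
--     return go(data)
-- ===== Notes on version B (the rewrite author's own statement) =====
-- stated objective: alternative
-- what changed: A's two-pointer while-loop over indices into the original list is replaced by a recursion on the list structure itself: each call peels one window off the front and back of the current segment and recurses on the physically sliced middle sublist, the remainder branches becoming the recursion's base cases; no left/right pointers or remaining_length state exist.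
-- outside the precondition, e.g. on sliding_window_sample([], 0): A returns [], B returns []
import Mathlib
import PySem

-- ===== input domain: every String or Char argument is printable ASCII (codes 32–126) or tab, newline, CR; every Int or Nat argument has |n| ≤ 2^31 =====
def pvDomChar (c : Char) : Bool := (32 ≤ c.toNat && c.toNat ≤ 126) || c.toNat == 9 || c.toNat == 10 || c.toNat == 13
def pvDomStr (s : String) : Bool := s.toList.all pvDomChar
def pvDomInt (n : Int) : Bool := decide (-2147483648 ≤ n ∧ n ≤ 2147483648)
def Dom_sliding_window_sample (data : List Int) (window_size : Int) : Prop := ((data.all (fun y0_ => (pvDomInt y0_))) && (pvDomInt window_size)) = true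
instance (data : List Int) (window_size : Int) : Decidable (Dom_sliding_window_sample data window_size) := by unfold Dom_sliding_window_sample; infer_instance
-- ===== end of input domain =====

-- B replaces A's two-pointer index loop by a recursion on the list: peel a window off each
-- end of the current segment and recurse on the sliced middle sublist (alternative decomposition).
-- ===== PORT A =====
-- A's while-loop; the fuel (data.length + 1) only makes it total — with 1 ≤ window_size
-- (Pre_) the loop always stops before the fuel runs out.
def pvLoopA (data : List Int) (w : Int) :
    Nat → Int → Int → List (List Int) → (List (List Int) × Int × Int)
  | 0, left, right, segs => (segs, left, right)
  | fuel + 1, left, right, segs =>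
    if 3 * w < right - left then
      pvLoopA data w fuel (left + w) (right - w)
        ((segs ++ [PySem.List.slice data (some left) (some (left + w))]) ++
          [PySem.List.slice data (some (right - w)) (some right)])
    else (segs, left, right)

def sliding_window_sample (data : List Int) (window_size : Int) : List (List Int) :=
  let data_length : Int := data.length
  if data_length < window_size then []
  else
    let res := pvLoopA data window_size (data.length + 1) 0 data_length []
    let segments := res.1
    let left := res.2.1
    let right := res.2.2
    let remaining_length := right - left
    if 1 * window_size < remaining_length ∧ remaining_length ≤ 2 * window_size then
      (segments ++ [PySem.List.slice data (some left) (some (left + window_size))]) ++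
        [PySem.List.slice data (some (right - window_size)) (some right)]
    else if 2 * window_size < remaining_length ∧ remaining_length ≤ 3 * window_size then
      let middle_start := left + PySem.Int.floordiv (remaining_length - window_size) 2
      ((segments ++ [PySem.List.slice data (some left) (some (left + window_size))]) ++
        [PySem.List.slice data (some middle_start) (some (middle_start + window_size))]) ++
        [PySem.List.slice data (some (right - window_size)) (some right)]
    else segments

-- ===== PORT B =====
-- B's inner recursion 'go'; the fuel only makes it total (with 1 ≤ w the segment
-- shrinks by 2*w ≥ 2 per call, so seg.length + 1 fuel always suffices).
def pvGoB (w : Int) : Nat → List Int → List (List Int)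
  | 0, _ => []
  | fuel + 1, seg =>
    let m : Int := seg.length
    if 3 * w < m then
      [PySem.List.slice seg none (some w), PySem.List.slice seg (some (m - w)) none] ++
        pvGoB w fuel (PySem.List.slice seg (some w) (some (m - w)))
    else if w < m ∧ m ≤ 2 * w then
      [PySem.List.slice seg none (some w), PySem.List.slice seg (some (m - w)) none]
    else if 2 * w < m then
      let mid := PySem.Int.floordiv (m - w) 2
      [PySem.List.slice seg none (some w), PySem.List.slice seg (some mid) (some (mid + w)),
       PySem.List.slice seg (some (m - w)) none]
    else []

def sliding_window_sample_alt (data : List Int) (window_size : Int) : List (List Int) :=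
  pvGoB window_size (data.length + 1) data

-- ===== PRECONDITION & SPEC =====
-- Pre_ excludes window_size ≤ 0: there Python A loops forever on every input except the
-- degenerate ([], 0), where both A and B return [] (so nothing A returns differently is hidden).
def Pre_sliding_window_sample (data : List Int) (window_size : Int) : Prop :=
  1 ≤ window_size
instance (data : List Int) (window_size : Int) : Decidable (Pre_sliding_window_sample data window_size) := by unfold Pre_sliding_window_sample; infer_instance

def pvWitness_sliding_window_sample : List Int × Int := ([1, 2, 3, 4, 5, 6, 7, 8], 1)

def Spec_sliding_window_sample (data : List Int) (window_size : Int) (out : List (List Int)) : Prop := out = sliding_window_sample_alt data window_size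
instance (data : List Int) (window_size : Int) (out : List (List Int)) : Decidable (Spec_sliding_window_sample data window_size out) := by unfold Spec_sliding_window_sample; infer_instance

-- ===== CLAIM (what is proved, stated in full; the proofs are below) =====
def Claim_equal_sliding_window_sample : Prop := ∀ (data : List Int) (window_size : Int), Dom_sliding_window_sample data window_size → Pre_sliding_window_sample data window_size → Spec_sliding_window_sample data window_size (sliding_window_sample data window_size)

-- ===== LEMMAS AND PROOFS =====

theorem pv_clamp (n : Nat) (i : Int) (h0 : 0 ≤ i) (hn : i ≤ (n : Int)) :
    PySem.List.clampIdx n i = i.toNat := by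
  simp only [PySem.List.clampIdx]
  rw [if_neg (by omega)]
  omega

-- Slices of a slice are slices of the original list (all bounds in range).
theorem pv_seg_slice (data : List Int) (l r a b : Int)
    (h0l : 0 ≤ l) (hlr : l ≤ r) (hrn : r ≤ (data.length : Int)) (h0a : 0 ≤ a) (hab : a ≤ b)
    (hb : b ≤ r - l) :
    PySem.List.slice (PySem.List.slice data (some l) (some r)) (some a) (some b) =
      PySem.List.slice data (some (l + a)) (some (l + b)) := by
  rw [PySem.List.slice_of_nonneg data h0l (by omega) (by omega) hrn,
      PySem.List.slice_toNat _ h0a (by omega : (0:Int) ≤ b),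
      PySem.List.slice_of_nonneg data (by omega : (0:Int) ≤ l + a) (by omega)
        (by omega) (by omega : l + b ≤ (data.length : Int))]
  rw [List.drop_take, List.drop_drop, List.take_take]
  congr 1
  · omega
  · congr 1
    omega

-- The tail slice of the segment is the corresponding tail slice of data.
theorem pv_seg_tail (data : List Int) (l r w : Int)
    (h0l : 0 ≤ l) (hrn : r ≤ (data.length : Int)) (hw : 0 ≤ w) (hwr : l + w ≤ r) :
    PySem.List.slice (PySem.List.slice data (some l) (some r)) (some ((r - l) - w)) none =
      PySem.List.slice data (some (r - w)) (some r) := by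
  rw [PySem.List.slice_some_none]
  rw [PySem.List.slice_of_nonneg data h0l (by omega) (by omega) hrn,
      PySem.List.slice_of_nonneg data (by omega : (0:Int) ≤ r - w) (by omega) (by omega) hrn]
  have hclamp : PySem.List.clampIdx ((List.take (r.toNat - l.toNat) (List.drop l.toNat data)).length)
      (r - l - w) = (r - l - w).toNat := by
    rw [pv_clamp _ _ (by omega)]
    simp
    omega
  rw [hclamp]
  rw [List.drop_take, List.drop_drop]
  congr 1
  · omega
  · congr 1
    omega

-- The head slice of the segment is the corresponding head slice of data.
theorem pv_seg_head (data : List Int) (l r w : Int)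
    (h0l : 0 ≤ l) (hrn : r ≤ (data.length : Int)) (hw : 0 ≤ w) (hwr : l + w ≤ r) :
    PySem.List.slice (PySem.List.slice data (some l) (some r)) none (some w) =
      PySem.List.slice data (some l) (some (l + w)) := by
  rw [← PySem.List.slice_zero_start,
      pv_seg_slice data l r 0 w h0l (by omega) hrn le_rfl hw (by omega)]
  simp

-- The middle part of the claim: everything A appends from loop state (l, r) onwards equals
-- what B's recursion produces on the middle segment data[l:r].
theorem pv_main (data : List Int) (w : Int) (hw : 1 ≤ w) :
    ∀ (fuel : Nat) (l r : Int) (segs : List (List Int)),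
      0 ≤ l → l ≤ r → r ≤ (data.length : Int) → (r - l).toNat < fuel →
      (let res := pvLoopA data w fuel l r segs
       let segments := res.1
       let left := res.2.1
       let right := res.2.2
       let remaining_length := right - left
       if 1 * w < remaining_length ∧ remaining_length ≤ 2 * w then
         (segments ++ [PySem.List.slice data (some left) (some (left + w))]) ++
           [PySem.List.slice data (some (right - w)) (some right)]
       else if 2 * w < remaining_length ∧ remaining_length ≤ 3 * w then
         let middle_start := left + PySem.Int.floordiv (remaining_length - w) 2
         ((segments ++ [PySem.List.slice data (some left) (some (left + w))]) ++
           [PySem.List.slice data (some middle_start) (some (middle_start + w))]) ++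
           [PySem.List.slice data (some (right - w)) (some right)]
       else segments) =
      segs ++ pvGoB w fuel (PySem.List.slice data (some l) (some r)) := by
  intro fuel
  induction fuel with
  | zero => intro l r segs _ _ _ hf; omega
  | succ fuel ih =>
    intro l r segs h0l hlr hrn hf
    have hm : ((PySem.List.slice data (some l) (some r)).length : Int) = r - l := by
      rw [PySem.List.slice_of_nonneg data h0l (by omega) (by omega) hrn]
      simp
      omega
    by_cases hc : 3 * w < r - l
    · -- both sides take one peeling step
      have hstep : pvLoopA data w (fuel + 1) l r segs =
          pvLoopA data w fuel (l + w) (r - w)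
            ((segs ++ [PySem.List.slice data (some l) (some (l + w))]) ++
              [PySem.List.slice data (some (r - w)) (some r)]) := by
        simp [pvLoopA, hc]
      have hB : pvGoB w (fuel + 1) (PySem.List.slice data (some l) (some r)) =
          [PySem.List.slice data (some l) (some (l + w)),
           PySem.List.slice data (some (r - w)) (some r)] ++
            pvGoB w fuel (PySem.List.slice data (some (l + w)) (some (r - w))) := by
        have h3 : PySem.List.slice (PySem.List.slice data (some l) (some r))
              (some w) (some ((r - l) - w)) =
            PySem.List.slice data (some (l + w)) (some (r - w)) := by
          rw [pv_seg_slice data l r w (r - l - w) h0l (by omega) hrn (by omega) (by omega)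
              (by omega)]
          congr 2
          omega
        simp only [pvGoB, hm]
        rw [if_pos hc]
        rw [pv_seg_head data l r w h0l hrn (by omega) (by omega),
            pv_seg_tail data l r w h0l hrn (by omega) (by omega), h3]
      rw [hB]
      simp only [hstep]
      rw [ih (l + w) (r - w) _ (by omega) (by omega) (by omega) (by omega)]
      simp [List.append_assoc]
    · -- terminal state: A's remainder branches = B's base cases
      have hstop : pvLoopA data w (fuel + 1) l r segs = (segs, l, r) := by
        simp [pvLoopA, hc]
      simp only [hstop]
      by_cases hb1 : 1 * w < r - l ∧ r - l ≤ 2 * w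
      · simp only [pvGoB, hm]
        rw [if_pos hb1, if_neg hc,
            if_pos (show w < r - l ∧ r - l ≤ 2 * w by omega)]
        rw [pv_seg_head data l r w h0l hrn (by omega) (by omega),
            pv_seg_tail data l r w h0l hrn (by omega) (by omega)]
        simp
      · by_cases hb2 : 2 * w < r - l ∧ r - l ≤ 3 * w
        · have hfd0 : 0 ≤ PySem.Int.floordiv (r - l - w) 2 := by
            have := (PySem.Int.le_floordiv_iff_mul_le (by omega : (0:Int) < 2)).mpr
              (by omega : (0:Int) * 2 ≤ r - l - w)
            omega
          have hfdle : PySem.Int.floordiv (r - l - w) 2 ≤ r - l - w := by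
            have := (PySem.Int.floordiv_lt_iff_lt_mul (by omega : (0:Int) < 2)).mpr
              (by omega : r - l - w < (r - l - w + 1) * 2)
            omega
          have h3 : PySem.List.slice (PySem.List.slice data (some l) (some r))
                (some (PySem.Int.floordiv ((r - l) - w) 2))
                (some (PySem.Int.floordiv ((r - l) - w) 2 + w)) =
              PySem.List.slice data (some (l + PySem.Int.floordiv ((r - l) - w) 2))
                (some (l + PySem.Int.floordiv ((r - l) - w) 2 + w)) := by
            rw [pv_seg_slice data l r _ _ h0l (by omega) hrn hfd0 (by omega) (by omega),
                ← Int.add_assoc]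
          simp only [pvGoB, hm]
          rw [if_neg hb1, if_pos hb2, if_neg hc,
              if_neg (show ¬ (w < r - l ∧ r - l ≤ 2 * w) by omega),
              if_pos (show 2 * w < r - l by omega)]
          rw [pv_seg_head data l r w h0l hrn (by omega) (by omega),
              pv_seg_tail data l r w h0l hrn (by omega) (by omega), h3]
          simp [List.append_assoc]
        · -- remaining_length ≤ w: nothing appended on either side
          simp only [pvGoB, hm]
          rw [if_neg hb1, if_neg hb2, if_neg hc,
              if_neg (show ¬ (w < r - l ∧ r - l ≤ 2 * w) by omega),
              if_neg (show ¬ 2 * w < r - l by omega)]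
          simp

-- ===== VERDICT (by name: the statement is the Claim_ definition above) =====
theorem sliding_window_sample_spec : Claim_equal_sliding_window_sample := by
  intro data w _ hw
  unfold Spec_sliding_window_sample sliding_window_sample sliding_window_sample_alt
  have hmain := pv_main data w hw (data.length + 1) 0 (data.length : Int) []
    le_rfl (by positivity) le_rfl (by omega)
  simp only [List.nil_append] at hmain
  have hdata : PySem.List.slice data (some 0) (some (data.length : Int)) = data := by
    rw [PySem.List.slice_of_nonneg data le_rfl (by positivity) (by positivity) le_rfl]
    simp
  rw [hdata] at hmain
  by_cases hlen : (data.length : Int) < w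
  · -- A returns [] early; B's recursion hits its trivial base case (m ≤ w)
    simp only [if_pos hlen]
    simp only [pvGoB]
    rw [if_neg (by omega), if_neg (by omega), if_neg (by omega)]
  · simp only [if_neg hlen]
    exact hmain
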